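-- pv_equiv track=rewrite | github.com/HungKNguyen/MineSweeperCloneAndAISolver | solver.py | surrounding_set
-- ===== SOURCE A (Python) =====
-- def surrounding_set(grid, index):
--     surrounding = set()
--     upper = max([0, index[0] - 1])
--     lower = min([len(grid) - 1, index[0] + 1])
--     left = max([0, index[1] - 1])
--     right = min([len(grid[0]) - 1, index[1] + 1])
--     for row in range(upper, lower + 1):
--         for col in range(left, right + 1):
--             if row == index[0] and col == index[1]:
--                 continue
--             surrounding.add((row, col))
--     return surrounding
-- ===== SOURCE B (Python) =====
-- def surrounding_set(grid, index):
--     cols = len(grid[0])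
--     return {(r, c)
--             for r in range(len(grid))
--             for c in range(cols)
--             if max(abs(r - index[0]), abs(c - index[1])) == 1}
-- ===== Notes on version B (the rewrite author's own statement) =====
-- stated objective: alternative
-- what changed: Instead of clamping a 3x3 window with min/max and enumerating it, B scans every cell of the grid once and keeps exactly the cells at Chebyshev distance 1 from the index.
import Mathlib
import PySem

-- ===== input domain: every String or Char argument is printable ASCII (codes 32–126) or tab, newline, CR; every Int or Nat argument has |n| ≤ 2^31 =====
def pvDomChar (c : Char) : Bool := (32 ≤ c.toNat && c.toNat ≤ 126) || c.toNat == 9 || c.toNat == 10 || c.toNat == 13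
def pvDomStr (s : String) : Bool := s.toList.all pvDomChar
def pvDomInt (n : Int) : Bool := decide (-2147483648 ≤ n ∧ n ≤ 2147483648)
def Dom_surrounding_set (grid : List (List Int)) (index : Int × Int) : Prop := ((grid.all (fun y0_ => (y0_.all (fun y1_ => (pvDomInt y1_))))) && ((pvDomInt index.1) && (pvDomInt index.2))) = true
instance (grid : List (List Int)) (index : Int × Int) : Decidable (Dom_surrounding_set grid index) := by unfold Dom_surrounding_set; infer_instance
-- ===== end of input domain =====

-- B scans every cell of the grid once, keeping the cells at Chebyshev distance 1
-- from the index, instead of A's min/max-clamped 3x3 window enumeration (objective: alternative).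

-- ===== PORT A =====
def surrounding_set (grid : List (List Int)) (index : Int × Int) : List (Int × Int) :=
  let surrounding : PySem.Set (Int × Int) := PySem.Set.empty
  let upper : Int := max 0 (index.1 - 1)
  let lower : Int := min ((grid.length : Int) - 1) (index.1 + 1)
  let left : Int := max 0 (index.2 - 1)
  -- grid[0] raises IndexError on an empty grid: excluded by Pre_; total form pyGetD is exact under Pre_.
  let right : Int := min (((PySem.List.pyGetD grid 0 []).length : Int) - 1) (index.2 + 1)
  (PySem.List.pyRange upper (lower + 1) 1).foldl (fun surrounding row =>
    (PySem.List.pyRange left (right + 1) 1).foldl (fun surrounding col =>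
      if row = index.1 ∧ col = index.2 then surrounding
      else PySem.Set.add surrounding (row, col)) surrounding) surrounding

-- ===== PORT B =====
def surrounding_set_alt (grid : List (List Int)) (index : Int × Int) : List (Int × Int) :=
  let cols : Int := (PySem.List.pyGetD grid 0 []).length   -- len(grid[0]): IndexError on [] is outside Pre_
  (PySem.List.pyRange 0 (grid.length : Int) 1).foldl (fun res r =>
    (PySem.List.pyRange 0 cols 1).foldl (fun res c =>
      if max |r - index.1| |c - index.2| = 1 then PySem.Set.add res (r, c) else res)
      res) PySem.Set.empty

-- ===== PRECONDITION & SPEC =====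
-- Pre_ excludes exactly the empty grid, on which both Pythons raise IndexError at len(grid[0]).
def Pre_surrounding_set (grid : List (List Int)) (index : Int × Int) : Prop := grid ≠ []
instance (grid : List (List Int)) (index : Int × Int) : Decidable (Pre_surrounding_set grid index) := by unfold Pre_surrounding_set; infer_instance
def pvWitness_surrounding_set : List (List Int) × (Int × Int) := ([[0, 1], [2, 3]], (0, 1))

def Spec_surrounding_set (grid : List (List Int)) (index : Int × Int) (out : List (Int × Int)) : Prop := out = surrounding_set_alt grid index
instance (grid : List (List Int)) (index : Int × Int) (out : List (Int × Int)) : Decidable (Spec_surrounding_set grid index out) := by unfold Spec_surrounding_set; infer_instance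

-- ===== CLAIM (what is proved, stated in full; the proofs are below) =====
def Claim_equal_surrounding_set : Prop := ∀ (grid : List (List Int)) (index : Int × Int), Dom_surrounding_set grid index → Pre_surrounding_set grid index → Spec_surrounding_set grid index (surrounding_set grid index)

-- ===== LEMMAS AND PROOFS =====

-- Folding "skip x if P x, else add x" over a duplicate-free list disjoint from the
-- accumulated set appends exactly the elements with ¬P, in order.
theorem pv_foldl_skip_add {α : Type} [BEq α] [LawfulBEq α] (P : α → Prop) [DecidablePred P]
    (cs : List α) (s0 : PySem.Set α) (hnd : cs.Nodup) (hd : ∀ x ∈ cs, x ∉ s0) :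
    cs.foldl (fun s x => if P x then s else PySem.Set.add s x) s0
      = s0 ++ cs.filter (fun x => !decide (P x)) := by
  induction cs generalizing s0 with
  | nil => simp
  | cons a cs ih =>
    have ha : a ∉ cs := (List.nodup_cons.mp hnd).1
    have hnd' : cs.Nodup := (List.nodup_cons.mp hnd).2
    simp only [List.foldl_cons, List.filter_cons]
    by_cases hP : P a
    · rw [if_pos hP, ih s0 hnd' (fun x hx => hd x (List.mem_cons_of_mem _ hx))]
      simp [hP]
    · rw [if_neg hP]
      have has0 : a ∉ s0 := hd a (List.mem_cons_self)
      have hadd : PySem.Set.add s0 a = s0 ++ [a] := by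
        simp [PySem.Set.add, has0]
      have hd' : ∀ x ∈ cs, x ∉ s0 ++ [a] := by
        intro x hx
        simp only [List.mem_append, List.mem_singleton]
        rintro (h | rfl)
        · exact hd x (List.mem_cons_of_mem _ hx) h
        · exact ha hx
      rw [hadd, ih (s0 ++ [a]) hnd' hd']
      simp [hP]

-- Cartesian product commutes with filtering each factor.
theorem pv_product_filter {α β : Type} (p : α → Bool) (q : β → Bool) (xs : List α) (ys : List β) :
    (xs.filter p) ×ˢ (ys.filter q) = (xs ×ˢ ys).filter (fun z => p z.1 && q z.2) := by
  induction xs with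
  | nil => rfl
  | cons a xs ih =>
    rw [List.filter_cons,
      show ((a :: xs) ×ˢ ys) = ys.map (a, ·) ++ xs ×ˢ ys from rfl, List.filter_append]
    by_cases hpa : p a
    · rw [if_pos hpa,
        show ((a :: xs.filter p) ×ˢ (ys.filter q))
          = (ys.filter q).map (a, ·) ++ (xs.filter p) ×ˢ (ys.filter q) from rfl,
        ih, List.filter_map]
      congr 1
      congr 1
      apply List.filter_congr
      intro y _
      simp [hpa]
    · rw [if_neg hpa, ih]
      have : (ys.map (a, ·)).filter (fun z => p z.1 && q z.2) = [] := by
        rw [List.filter_map]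
        have : ys.filter ((fun z => p z.1 && q z.2) ∘ (a, ·)) = [] := by
          apply List.filter_eq_nil_iff.mpr
          intro y _
          simp [hpa]
        rw [this]; rfl
      rw [this, List.nil_append]

-- Filtering range(0, n) down to the window |r - a| <= 1 yields exactly A's clamped range.
theorem pv_filter_range_window (n a : Int) (hn : 0 ≤ n) :
    (PySem.List.pyRange 0 n 1).filter (fun r => decide (|r - a| ≤ 1))
      = PySem.List.pyRange (max 0 (a - 1)) (min (n - 1) (a + 1) + 1) 1 := by
  by_cases hle : max 0 (a - 1) ≤ min (n - 1) (a + 1) + 1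
  · rw [PySem.List.pyRange_one_append 0 (max 0 (a - 1)) n (by omega) (by omega),
        PySem.List.pyRange_one_append (max 0 (a - 1)) (min (n - 1) (a + 1) + 1) n hle (by omega),
        List.filter_append, List.filter_append]
    have e1 : (PySem.List.pyRange 0 (max 0 (a - 1)) 1).filter (fun r => decide (|r - a| ≤ 1)) = [] := by
      apply List.filter_eq_nil_iff.mpr
      intro r hr
      rw [PySem.List.mem_pyRange_one] at hr
      simp only [decide_eq_true_eq, abs_le]
      omega
    have e2 : (PySem.List.pyRange (max 0 (a - 1)) (min (n - 1) (a + 1) + 1) 1).filter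
        (fun r => decide (|r - a| ≤ 1)) = PySem.List.pyRange (max 0 (a - 1)) (min (n - 1) (a + 1) + 1) 1 := by
      apply List.filter_eq_self.mpr
      intro r hr
      rw [PySem.List.mem_pyRange_one] at hr
      simp only [decide_eq_true_eq, abs_le]
      omega
    have e3 : (PySem.List.pyRange (min (n - 1) (a + 1) + 1) n 1).filter
        (fun r => decide (|r - a| ≤ 1)) = [] := by
      apply List.filter_eq_nil_iff.mpr
      intro r hr
      rw [PySem.List.mem_pyRange_one] at hr
      simp only [decide_eq_true_eq, abs_le]
      omega
    rw [e1, e2, e3, List.nil_append, List.append_nil]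
  · rw [show PySem.List.pyRange (max 0 (a - 1)) (min (n - 1) (a + 1) + 1) 1 = []
        from PySem.List.pyRange_one_eq_nil (by omega)]
    apply List.filter_eq_nil_iff.mpr
    intro r hr
    rw [PySem.List.mem_pyRange_one] at hr
    simp only [decide_eq_true_eq, abs_le]
    omega

-- Chebyshev distance 1 = inside the 3x3 window and not the center.
theorem pv_cheb (x y : Int) : max |x| |y| = 1 ↔ |x| ≤ 1 ∧ |y| ≤ 1 ∧ ¬(x = 0 ∧ y = 0) := by
  rcases abs_cases x with ⟨h1, _⟩ | ⟨h1, _⟩ <;> rcases abs_cases y with ⟨h2, _⟩ | ⟨h2, _⟩ <;>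
    rw [h1, h2, max_def] <;> split_ifs <;> omega

theorem pv_main (grid : List (List Int)) (index : Int × Int) :
    surrounding_set grid index = surrounding_set_alt grid index := by
  obtain ⟨i0, i1⟩ := index
  have hn0 : (0 : Int) ≤ (grid.length : Int) := Int.natCast_nonneg _
  have hm0 : (0 : Int) ≤ ((PySem.List.pyGetD grid 0 []).length : Int) := Int.natCast_nonneg _
  set n : Int := (grid.length : Int) with hn
  set m : Int := ((PySem.List.pyGetD grid 0 []).length : Int) with hm
  -- ===== A as a filtered product of the clamped ranges =====
  have hA0 : surrounding_set grid (i0, i1)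
      = ((PySem.List.pyRange (max 0 (i0 - 1)) (min (n - 1) (i0 + 1) + 1) 1).flatMap
          (fun r => (PySem.List.pyRange (max 0 (i1 - 1)) (min (m - 1) (i1 + 1) + 1) 1).map
            (fun c => (r, c)))).foldl
          (fun s x => if x.1 = i0 ∧ x.2 = i1 then s else PySem.Set.add s x) [] := by
    rw [List.foldl_flatMap]
    simp only [List.foldl_map]
    rfl
  have hndA : ((PySem.List.pyRange (max 0 (i0 - 1)) (min (n - 1) (i0 + 1) + 1) 1) ×ˢ
      (PySem.List.pyRange (max 0 (i1 - 1)) (min (m - 1) (i1 + 1) + 1) 1)).Nodup :=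
    List.Nodup.product (PySem.List.nodup_pyRange_one _ _) (PySem.List.nodup_pyRange_one _ _)
  have hA1 : surrounding_set grid (i0, i1)
      = (((PySem.List.pyRange (max 0 (i0 - 1)) (min (n - 1) (i0 + 1) + 1) 1) ×ˢ
          (PySem.List.pyRange (max 0 (i1 - 1)) (min (m - 1) (i1 + 1) + 1) 1)).filter
            (fun x => !decide (x.1 = i0 ∧ x.2 = i1))) := by
    rw [hA0]
    have := pv_foldl_skip_add (fun x : Int × Int => x.1 = i0 ∧ x.2 = i1)
      ((PySem.List.pyRange (max 0 (i0 - 1)) (min (n - 1) (i0 + 1) + 1) 1) ×ˢ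
        (PySem.List.pyRange (max 0 (i1 - 1)) (min (m - 1) (i1 + 1) + 1) 1)) []
      hndA (by simp)
    simpa using this
  -- ===== B as a filtered product of the full ranges =====
  have hB0 : surrounding_set_alt grid (i0, i1)
      = ((PySem.List.pyRange 0 n 1).flatMap
          (fun r => (PySem.List.pyRange 0 m 1).map (fun c => (r, c)))).foldl
          (fun s x => if ¬ max |x.1 - i0| |x.2 - i1| = 1 then s else PySem.Set.add s x) [] := by
    rw [List.foldl_flatMap]
    simp only [List.foldl_map]
    show surrounding_set_alt grid (i0, i1)
      = (PySem.List.pyRange 0 n 1).foldl (fun s r =>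
          (PySem.List.pyRange 0 m 1).foldl (fun s c =>
            if ¬ max |r - i0| |c - i1| = 1 then s else PySem.Set.add s (r, c)) s) []
    unfold surrounding_set_alt
    simp only [← hm, ← hn]
    congr 1
    funext s r
    congr 1
    funext s c
    by_cases h : max |r - i0| |c - i1| = 1 <;> simp [h]
  have hndB : ((PySem.List.pyRange 0 n 1) ×ˢ (PySem.List.pyRange 0 m 1)).Nodup :=
    List.Nodup.product (PySem.List.nodup_pyRange_one _ _) (PySem.List.nodup_pyRange_one _ _)
  have hB1 : surrounding_set_alt grid (i0, i1)
      = (((PySem.List.pyRange 0 n 1) ×ˢ (PySem.List.pyRange 0 m 1)).filter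
          (fun x => decide (max |x.1 - i0| |x.2 - i1| = 1))) := by
    rw [hB0]
    have := pv_foldl_skip_add (fun x : Int × Int => ¬ max |x.1 - i0| |x.2 - i1| = 1)
      ((PySem.List.pyRange 0 n 1) ×ˢ (PySem.List.pyRange 0 m 1)) [] hndB (by simp)
    simpa using this
  -- split B's Chebyshev predicate into the separable window and the center exclusion
  have hB2 : surrounding_set_alt grid (i0, i1)
      = ((((PySem.List.pyRange 0 n 1) ×ˢ (PySem.List.pyRange 0 m 1)).filter
          (fun z => decide (|z.1 - i0| ≤ 1) && decide (|z.2 - i1| ≤ 1))).filter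
            (fun x => !decide (x.1 = i0 ∧ x.2 = i1))) := by
    rw [hB1, List.filter_filter]
    apply List.filter_congr
    intro x _
    obtain ⟨r, c⟩ := x
    rw [Bool.eq_iff_iff]
    simp only [decide_eq_true_eq, Bool.and_eq_true, Bool.not_eq_true', decide_eq_false_iff_not]
    rw [pv_cheb, abs_le, abs_le]
    omega
  -- A's clamped ranges are the filtered full ranges; fold the two filters into the product
  rw [← pv_filter_range_window n i0 hn0, ← pv_filter_range_window m i1 hm0,
      pv_product_filter] at hA1
  exact hA1.trans hB2.symm

-- ===== VERDICT (by name: the statement is the Claim_ definition above) =====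
theorem surrounding_set_spec : Claim_equal_surrounding_set := by
  intro grid index _ _
  unfold Spec_surrounding_set
  exact pv_main grid index
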